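-- pv_equiv track=rewrite | github.com/JuHyun-K/algorithm_ps | programmers/weirdStr.py | solution
-- ===== SOURCE A (Python) =====
-- def solution(s):
--     answer = []
--     #한글자씩 대소문자로 바꾸고 -> tmp에 접착 -> join사용
--
--     s = s.upper()
--     s = s.split(' ')
--     s = list(map(list, s))
--
--     for x in s:
--         tmp = ''
--         for i in range(0, len(x)):
--             if(i%2 == 0):
--                 c = x[i].upper() #list 원소에서 작업하는 것이 아니
--             else:
--                 c = x[i].lower()
--             tmp += c
--         answer.append(tmp)
--     return ' '.join(answer)
-- ===== SOURCE B (Python) =====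
-- def solution(s):
--     out = []
--     k = 0
--     for c in s:
--         if c == ' ':
--             out.append(c)
--             k = 0
--         else:
--             out.append(c.upper() if k % 2 == 0 else c.lower())
--             k += 1
--     return ''.join(out)
-- ===== Notes on version B (the rewrite author's own statement) =====
-- stated objective: simpler
-- what changed: Replaces split-on-space + per-word indexed inner loop + join with a single pass over the string that keeps a position counter reset at each space.
import Mathlib
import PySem

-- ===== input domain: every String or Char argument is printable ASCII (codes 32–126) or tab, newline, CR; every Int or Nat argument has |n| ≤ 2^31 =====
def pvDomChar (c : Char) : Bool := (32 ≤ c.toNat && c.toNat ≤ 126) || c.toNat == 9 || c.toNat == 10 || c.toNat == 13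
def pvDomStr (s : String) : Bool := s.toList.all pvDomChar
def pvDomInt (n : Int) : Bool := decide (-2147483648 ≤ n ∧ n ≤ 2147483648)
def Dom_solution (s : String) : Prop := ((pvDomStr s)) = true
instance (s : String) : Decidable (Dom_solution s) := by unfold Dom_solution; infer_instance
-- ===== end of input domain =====

-- B changes the decomposition: one pass with a counter reset at each space, instead of
-- split-on-space, a per-word indexed loop and a join (objective: simpler).

-- ===== PORT A =====
-- inner loop: for i in range(0, len(x)): tmp += x[i].upper() / x[i].lower()
def solWordLoop (x : List Char) : List Char :=
  (PySem.List.pyRange 0 (x.length : Int) 1).foldl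
    (fun tmp i =>
      let c := if PySem.Int.mod i 2 = 0
               then PySem.Chars.upperChar (PySem.List.pyGetD x i ' ')
               else PySem.Chars.lowerChar (PySem.List.pyGetD x i ' ')
      tmp ++ [c]) []

def solution (s : String) : String :=
  String.ofList (PySem.Chars.join [' ']
    ((PySem.Chars.splitOn (PySem.Chars.upper s.toList) [' ']).foldl
      (fun answer x => answer ++ [solWordLoop x]) []))

-- ===== PORT B =====
def solution_alt (s : String) : String :=
  String.ofList
    (s.toList.foldl
      (fun (st : List Char × Nat) c =>
        if c = ' ' then (st.1 ++ [c], 0)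
        else (st.1 ++ [if st.2 % 2 = 0 then PySem.Chars.upperChar c else PySem.Chars.lowerChar c],
              st.2 + 1))
      ([], 0)).1

-- ===== PRECONDITION & SPEC =====
def Spec_solution (s : String) (out : String) : Prop := out = solution_alt s
instance (s : String) (out : String) : Decidable (Spec_solution s out) := by unfold Spec_solution; infer_instance

-- ===== CLAIM (what is proved, stated in full; the proofs are below) =====
def Claim_equal_solution : Prop := ∀ (s : String), Dom_solution s → Spec_solution s (solution s)

-- ===== LEMMAS AND PROOFS =====

-- even/odd case of a character (shared shape of both programs, used only in proofs)
def caseCh (k : Nat) (c : Char) : Char :=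
  if k % 2 = 0 then PySem.Chars.upperChar c else PySem.Chars.lowerChar c

-- alternate-case a word, position counter k
def altCase : Nat → List Char → List Char
  | _, [] => []
  | k, c :: r => caseCh k c :: altCase (k + 1) r

-- structural split on ' ' with a pending prefix for the first word
def wSplit : List Char → List Char → List (List Char)
  | pre, [] => [pre]
  | pre, c :: r => if c = ' ' then pre :: wSplit [] r else wSplit (pre ++ [c]) r

-- what B computes from counter k on the remaining characters
def bRun : Nat → List Char → List Char
  | _, [] => []
  | k, c :: r => if c = ' ' then ' ' :: bRun 0 r else caseCh k c :: bRun (k + 1) r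

lemma char_eq_iff_toNat (c d : Char) : c = d ↔ c.toNat = d.toNat :=
  eq_iff_eq_of_cmp_eq_cmp rfl

lemma char_le_iff_toNat (c d : Char) : (c ≤ d) ↔ c.toNat ≤ d.toNat := by
  rw [Char.le_def]; exact UInt32.le_iff_toNat_le

lemma toNat_ofNat_small (n : Nat) (h : n < 200) : (Char.ofNat n).toNat = n := by
  unfold Char.ofNat
  rw [dif_pos (by constructor; omega)]
  rfl

lemma islower_iff (c : Char) :
    PySem.Chars.islower c = true ↔ 97 ≤ c.toNat ∧ c.toNat ≤ 122 := by
  unfold PySem.Chars.islower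
  rw [Bool.and_eq_true, decide_eq_true_iff, decide_eq_true_iff,
      char_le_iff_toNat, char_le_iff_toNat,
      show ('a').toNat = 97 from rfl, show ('z').toNat = 122 from rfl]

lemma isupper_iff (c : Char) :
    PySem.Chars.isupper c = true ↔ 65 ≤ c.toNat ∧ c.toNat ≤ 90 := by
  unfold PySem.Chars.isupper
  rw [Bool.and_eq_true, decide_eq_true_iff, decide_eq_true_iff,
      char_le_iff_toNat, char_le_iff_toNat,
      show ('A').toNat = 65 from rfl, show ('Z').toNat = 90 from rfl]

lemma upperChar_eq_space_iff (c : Char) : PySem.Chars.upperChar c = ' ' ↔ c = ' ' := by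
  unfold PySem.Chars.upperChar
  split_ifs with h
  · rw [islower_iff] at h
    rw [char_eq_iff_toNat, char_eq_iff_toNat, toNat_ofNat_small _ (by omega),
        show (' ').toNat = 32 from rfl]
    omega
  · rfl

lemma upperChar_upperChar (c : Char) :
    PySem.Chars.upperChar (PySem.Chars.upperChar c) = PySem.Chars.upperChar c := by
  unfold PySem.Chars.upperChar
  split_ifs with h h2
  · exfalso
    rw [islower_iff] at h h2
    rw [toNat_ofNat_small _ (by omega)] at h2
    omega
  · rfl
  · rfl

lemma lowerChar_upperChar (c : Char) :
    PySem.Chars.lowerChar (PySem.Chars.upperChar c) = PySem.Chars.lowerChar c := by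
  by_cases h : PySem.Chars.islower c = true
  · have ht := (islower_iff c).mp h
    have h1 : (Char.ofNat (c.toNat - 32)).toNat = c.toNat - 32 :=
      toNat_ofNat_small _ (by omega)
    have hu : PySem.Chars.upperChar c = Char.ofNat (c.toNat - 32) := by
      unfold PySem.Chars.upperChar; rw [if_pos h]
    have hcu : PySem.Chars.isupper (Char.ofNat (c.toNat - 32)) = true := by
      rw [isupper_iff, h1]; omega
    have hncu : PySem.Chars.isupper c = false := by
      rw [Bool.eq_false_iff]
      intro hx
      rw [isupper_iff] at hx
      omega
    unfold PySem.Chars.lowerChar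
    rw [hu, if_pos hcu, if_neg (by rw [hncu]; simp)]
    rw [char_eq_iff_toNat, h1, toNat_ofNat_small _ (by omega)]
    omega
  · have hu : PySem.Chars.upperChar c = c := by
      unfold PySem.Chars.upperChar; rw [if_neg h]
    rw [hu]

lemma caseCh_upperChar (k : Nat) (c : Char) :
    caseCh k (PySem.Chars.upperChar c) = caseCh k c := by
  unfold caseCh
  split_ifs
  · exact upperChar_upperChar c
  · exact lowerChar_upperChar c

-- splitOn with sep = " " is wSplit (fuel is large enough)
lemma splitOn_go_space (l : List Char) : ∀ (fuel : Nat) (cur : List Char)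
    (acc : List (List Char)), l.length < fuel →
    PySem.Chars.splitOn.go [' '] fuel l cur acc = acc.reverse ++ wSplit cur.reverse l := by
  induction l with
  | nil =>
    intro fuel cur acc hf
    match fuel, hf with
    | fuel + 1, _ => rw [PySem.Chars.splitOn.go.eq_def]; simp [wSplit]
  | cons c r ih =>
    intro fuel cur acc hf
    match fuel, hf with
    | fuel + 1, hf =>
      rw [PySem.Chars.splitOn.go.eq_def]
      simp only [List.length_cons] at hf
      by_cases hc : c = ' '
      · subst hc
        simp only [List.isPrefixOf, beq_self_eq_true, Bool.true_and,
          if_true, List.length_nil, List.length_cons, Nat.zero_add, List.drop_succ_cons,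
          List.drop_zero]
        rw [ih fuel [] (cur.reverse :: acc) (by omega)]
        simp [wSplit]
      · have hb : (' ' == c) = false := by simp [Ne.symm hc]
        simp only [List.isPrefixOf, hb, Bool.false_and, Bool.false_eq_true, if_false]
        rw [ih fuel (c :: cur) acc (by omega)]
        simp [wSplit, hc]

lemma splitOn_space (l : List Char) : PySem.Chars.splitOn l [' '] = wSplit [] l := by
  unfold PySem.Chars.splitOn
  rw [splitOn_go_space l (l.length + 1) [] [] (by omega)]
  rfl

-- the inner indexed loop of A is altCase 0
lemma solWordLoop_drop (x : List Char) : ∀ (j : Nat) (tmp : List Char), j ≤ x.length →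
    (PySem.List.pyRange (j : Int) (x.length : Int) 1).foldl
      (fun tmp i =>
        let c := if PySem.Int.mod i 2 = 0
                 then PySem.Chars.upperChar (PySem.List.pyGetD x i ' ')
                 else PySem.Chars.lowerChar (PySem.List.pyGetD x i ' ')
        tmp ++ [c]) tmp = tmp ++ altCase j (x.drop j) := by
  intro j
  induction hn : x.length - j generalizing j with
  | zero =>
    intro tmp hj
    have hj' : j = x.length := by omega
    subst hj'
    rw [PySem.List.pyRange_one_eq_nil (by omega)]
    simp [altCase, List.drop_of_length_le (le_refl x.length)]
  | succ n ih =>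
    intro tmp hj
    have hjlt : j < x.length := by omega
    rw [PySem.List.pyRange_one_cons (by exact_mod_cast hjlt)]
    have hcast : ((j : Int) + 1) = ((j + 1 : Nat) : Int) := by push_cast; ring
    have ihh := fun tmp => ih (j + 1) (by omega) tmp (by omega)
    rw [List.foldl_cons, hcast, ihh]
    have hget : PySem.List.pyGetD x (j : Int) ' ' = x[j] := by
      rw [PySem.List.pyGetD_natCast]
      exact List.getD_eq_getElem x ' ' hjlt
    have hdrop : x.drop j = x[j] :: x.drop (j + 1) := List.drop_eq_getElem_cons hjlt
    have hmod : (PySem.Int.mod (j : Int) 2 = 0) ↔ (j % 2 = 0) := by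
      rw [show PySem.Int.mod (j : Int) 2 = ((j % 2 : Nat) : Int) from by
        exact_mod_cast PySem.Int.mod_natCast j 2]
      exact Int.natCast_eq_zero
    simp only [hget, hdrop, altCase, caseCh]
    by_cases hp : j % 2 = 0
    · rw [if_pos (hmod.mpr hp), if_pos hp]; simp
    · rw [if_neg (fun h => hp (hmod.mp h)), if_neg hp]; simp

lemma solWordLoop_eq (x : List Char) : solWordLoop x = altCase 0 x := by
  unfold solWordLoop
  have := solWordLoop_drop x 0 [] (by omega)
  simpa using this

lemma altCase_append_singleton (k : Nat) (xs : List Char) (u : Char) :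
    altCase k (xs ++ [u]) = altCase k xs ++ [caseCh (k + xs.length) u] := by
  induction xs generalizing k with
  | nil => simp [altCase]
  | cons a t ih =>
    simp only [List.cons_append, altCase, ih (k + 1), List.length_cons]
    have h : k + 1 + t.length = k + (t.length + 1) := by omega
    rw [h]

lemma wSplit_ne_nil (pre l : List Char) : wSplit pre l ≠ [] := by
  induction l generalizing pre with
  | nil => simp [wSplit]
  | cons c r ih =>
    unfold wSplit
    split_ifs with h
    · simp
    · exact ih (pre ++ [c])

lemma join_cons_ne_nil (sep a : List Char) (ys : List (List Char)) (h : ys ≠ []) :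
    PySem.Chars.join sep (a :: ys) = a ++ sep ++ PySem.Chars.join sep ys := by
  match ys, h with
  | b :: t, _ => exact PySem.Chars.join_cons_cons sep a b t

-- the heart: join of per-word alternation over the uppercased split = B's single pass
lemma join_wSplit_upper (l : List Char) : ∀ (pre : List Char),
    PySem.Chars.join [' '] ((wSplit pre (PySem.Chars.upper l)).map (altCase 0)) =
      altCase 0 pre ++ bRun pre.length l := by
  induction l with
  | nil =>
    intro pre
    simp [PySem.Chars.upper, wSplit, bRun, PySem.Chars.join_singleton]
  | cons c r ih =>
    intro pre
    have hup : PySem.Chars.upper (c :: r) = PySem.Chars.upperChar c :: PySem.Chars.upper r := by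
      simp [PySem.Chars.upper]
    rw [hup]
    by_cases hc : c = ' '
    · have hsp : PySem.Chars.upperChar c = ' ' := (upperChar_eq_space_iff c).mpr hc
      rw [hsp]
      simp only [wSplit, if_true, List.map_cons]
      rw [join_cons_ne_nil [' '] (altCase 0 pre)
        ((wSplit [] (PySem.Chars.upper r)).map (altCase 0))
        (by simp [wSplit_ne_nil])]
      rw [ih []]
      simp [bRun, hc, altCase]
    · have hsp : PySem.Chars.upperChar c ≠ ' ' := fun h => hc ((upperChar_eq_space_iff c).mp h)
      simp only [wSplit, if_neg hsp]
      rw [ih (pre ++ [PySem.Chars.upperChar c])]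
      rw [altCase_append_singleton, caseCh_upperChar]
      simp only [bRun, if_neg hc, List.length_append, List.length_cons, List.length_nil]
      simp

-- B's fold computes bRun
lemma foldB (l : List Char) : ∀ (acc : List Char) (k : Nat),
    (l.foldl
      (fun (st : List Char × Nat) c =>
        if c = ' ' then (st.1 ++ [c], 0)
        else (st.1 ++ [if st.2 % 2 = 0 then PySem.Chars.upperChar c else PySem.Chars.lowerChar c],
              st.2 + 1))
      (acc, k)).1 = acc ++ bRun k l := by
  induction l with
  | nil => intro acc k; simp [bRun]
  | cons c r ih =>
    intro acc k
    rw [List.foldl_cons]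
    by_cases hc : c = ' '
    · rw [if_pos hc, ih]
      simp [bRun, hc]
    · rw [if_neg hc, ih]
      simp [bRun, hc, caseCh]

-- ===== VERDICT (by name: the statement is the Claim_ definition above) =====
theorem solution_spec : Claim_equal_solution := by
  intro s _
  unfold Spec_solution solution solution_alt
  rw [splitOn_space]
  rw [PySem.List.foldl_append_singleton_eq_map]
  have hmap : (wSplit [] (PySem.Chars.upper s.toList)).map solWordLoop =
      (wSplit [] (PySem.Chars.upper s.toList)).map (altCase 0) :=
    List.map_congr_left (fun x _ => solWordLoop_eq x)
  rw [hmap, List.nil_append, join_wSplit_upper s.toList []]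
  rw [foldB s.toList [] 0]
  simp [altCase]
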